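-- pv_equiv track=rewrite | github.com/zeemeeran/Python-challenges | codingchallenges/spaceinString.py | isSpace
-- ===== SOURCE A (Python) =====
-- def isSpace(sen):
--     for i in sen:
--         if i == '\t' :
--             return "tab"
--         elif i == ' ':
--             return "space"
--     else :
--             return "nospace"
-- ===== SOURCE B (Python) =====
-- def isSpace(sen):
--     t = sen.find('\t')
--     s = sen.find(' ')
--     if t == -1 and s == -1:
--         return "nospace"
--     if t != -1 and (s == -1 or t < s):
--         return "tab"
--     return "space"
-- ===== Notes on version B (the rewrite author's own statement) =====
-- stated objective: faster
-- what changed: Replaces the per-character Python-level early-exit loop by two C-level str.find index searches followed by a comparison of the found positions.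
import Mathlib
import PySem

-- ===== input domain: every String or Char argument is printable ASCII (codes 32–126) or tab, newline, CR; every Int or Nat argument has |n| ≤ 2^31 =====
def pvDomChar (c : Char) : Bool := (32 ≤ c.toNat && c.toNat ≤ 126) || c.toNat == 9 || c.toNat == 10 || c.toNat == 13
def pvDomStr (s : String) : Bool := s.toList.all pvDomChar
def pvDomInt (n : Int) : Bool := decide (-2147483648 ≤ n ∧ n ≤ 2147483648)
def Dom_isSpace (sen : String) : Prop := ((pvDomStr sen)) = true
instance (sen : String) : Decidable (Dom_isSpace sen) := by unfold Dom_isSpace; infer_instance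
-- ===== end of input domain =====

-- B replaces A's per-character early-exit loop by two find-based index searches and a position comparison (measured constant-factor speedup in Python via C-level str.find).


-- ===== PORT A =====
-- the for-loop with early returns, as structural recursion over the characters
def isSpaceLoop : List Char → String
  | [] => "nospace"
  | c :: rest => if c = '\t' then "tab" else if c = ' ' then "space" else isSpaceLoop rest

def isSpace (sen : String) : String := isSpaceLoop sen.toList

-- ===== PORT B =====
def isSpace_alt (sen : String) : String :=
  let t := PySem.Str.find sen "\t"
  let s := PySem.Str.find sen " "
  if t = -1 ∧ s = -1 then "nospace"
  else if t ≠ -1 ∧ (s = -1 ∨ t < s) then "tab"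
  else "space"

-- ===== PRECONDITION & SPEC =====
def Spec_isSpace (sen : String) (out : String) : Prop := out = isSpace_alt sen
instance (sen : String) (out : String) : Decidable (Spec_isSpace sen out) := by unfold Spec_isSpace; infer_instance

-- ===== CLAIM (what is proved, stated in full; the proofs are below) =====
def Claim_equal_isSpace : Prop := ∀ (sen : String), Dom_isSpace sen → Spec_isSpace sen (isSpace sen)

-- ===== LEMMAS AND PROOFS =====

theorem find_go_cons (x c : Char) (l : List Char) (k : Nat) :
    PySem.Chars.find.go [c] (x::l) k = if x = c then (k:Int) else PySem.Chars.find.go [c] l (k+1) := by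
  rw [PySem.Chars.find.go]
  simp [List.isPrefixOf]
  rcases eq_or_ne x c with h|h
  · simp [h]
  · simp [h]
    exact fun hc => absurd hc.symm h

theorem find_go_lb (c : Char) (l : List Char) (k : Nat) :
    PySem.Chars.find.go [c] l k = -1 ∨ (k:Int) ≤ PySem.Chars.find.go [c] l k := by
  induction l generalizing k with
  | nil => left; rw [PySem.Chars.find.go]; simp
  | cons x t ih =>
    rw [find_go_cons]
    rcases eq_or_ne x c with h|h
    · right; simp [h]
    · rcases ih (k+1) with h2|h2 <;> simp [h, h2] <;> omega

theorem loop_eq_find (l : List Char) (k : Nat) :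
    isSpaceLoop l =
      (let t := PySem.Chars.find.go ['\t'] l k
       let s := PySem.Chars.find.go [' '] l k
       if t = -1 ∧ s = -1 then "nospace"
       else if t ≠ -1 ∧ (s = -1 ∨ t < s) then "tab"
       else "space") := by
  induction l generalizing k with
  | nil => rw [PySem.Chars.find.go, PySem.Chars.find.go]; simp [isSpaceLoop]
  | cons x t ih =>
    simp only [find_go_cons]
    by_cases ht : x = '\t'
    · have hs : x ≠ ' ' := by simp [ht]
      rcases find_go_lb ' ' t (k+1) with h|h
      · simp [isSpaceLoop, ht, h]
      · simp [isSpaceLoop, ht]; omega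
    · by_cases hs : x = ' '
      · rcases find_go_lb '\t' t (k+1) with h|h
        · simp [isSpaceLoop, hs, h]
        · have hne : PySem.Chars.find.go ['\t'] t (k+1) ≠ -1 := by omega
          simp [isSpaceLoop, hs, hne]
          omega
      · simp [isSpaceLoop, ht, hs, ih (k+1)]

-- ===== VERDICT (by name: the statement is the Claim_ definition above) =====
theorem isSpace_spec : Claim_equal_isSpace := by
  intro sen _
  show isSpace sen = isSpace_alt sen
  unfold isSpace isSpace_alt
  simp only [PySem.Str.find_eq]
  have h1 : "\t".toList = ['\t'] := rfl
  have h2 : " ".toList = [' '] := rfl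
  simp only [h1, h2]
  show isSpaceLoop sen.toList = _
  rw [loop_eq_find sen.toList 0]
  rfl
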